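-- pv_equiv track=rewrite | github.com/mikkerlo/create-trees | build_html.py | find_anchors_annulus
-- ===== SOURCE A (Python) =====
-- def find_anchors_annulus(R, Ru):
--     """Anchors whose 2x2 footprint sits entirely in the cutting annulus
--     Ru^2 < d^2 <= R^2 and avoids the bearing tile (0,0)."""
--     R2 = R * R
--     Ru2 = Ru * Ru
--     anchors = []
--     for x in range(-R - 1, R + 2):
--         for y in range(-R - 1, R + 2):
--             ok = True
--             for dx, dy in ((0, 0), (1, 0), (0, 1), (1, 1)):
--                 tx, ty = x + dx, y + dy
--                 d2 = tx * tx + ty * ty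
--                 if d2 > R2 or d2 <= Ru2 or (tx, ty) == (0, 0):
--                     ok = False
--                     break
--             if ok:
--                 anchors.append((x, y))
--     return anchors
-- ===== SOURCE B (Python) =====
-- def find_anchors_annulus(R, Ru):
--     """Precompute the set of valid tiles once, then check the four footprint
--     corners of each anchor by set membership (same output order as A)."""
--     R2 = R * R
--     Ru2 = Ru * Ru
--     valid = set()
--     for tx in range(-R - 1, R + 3):
--         for ty in range(-R - 1, R + 3):
--             d2 = tx * tx + ty * ty
--             if Ru2 < d2 <= R2 and (tx, ty) != (0, 0):
--                 valid.add((tx, ty))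
--     anchors = []
--     for x in range(-R - 1, R + 2):
--         for y in range(-R - 1, R + 2):
--             if ((x, y) in valid and (x + 1, y) in valid
--                     and (x, y + 1) in valid and (x + 1, y + 1) in valid):
--                 anchors.append((x, y))
--     return anchors
-- ===== Notes on version B (the rewrite author's own statement) =====
-- stated objective: alternative
-- what changed: B first precomputes the set of all valid annulus tiles in one pass, then decides each anchor by four set-membership tests on its footprint corners, instead of recomputing each corner's distance condition inline with an early-break loop.
import Mathlib
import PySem

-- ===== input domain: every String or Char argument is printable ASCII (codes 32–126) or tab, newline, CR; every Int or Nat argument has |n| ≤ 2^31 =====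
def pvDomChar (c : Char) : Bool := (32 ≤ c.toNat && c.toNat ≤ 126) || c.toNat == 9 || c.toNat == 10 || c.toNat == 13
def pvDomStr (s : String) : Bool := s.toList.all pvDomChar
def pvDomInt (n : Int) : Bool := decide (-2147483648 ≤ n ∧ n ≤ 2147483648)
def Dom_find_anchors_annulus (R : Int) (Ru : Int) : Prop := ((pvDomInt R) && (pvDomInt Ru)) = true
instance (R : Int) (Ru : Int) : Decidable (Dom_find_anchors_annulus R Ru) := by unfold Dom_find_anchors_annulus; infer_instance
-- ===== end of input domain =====

-- B precomputes the set of valid annulus tiles once, then tests the four footprint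
-- corners of each anchor by set membership (objective: alternative decomposition; same cost class).

-- ===== PORT A =====
-- the inner `for dx, dy in (...)` loop with its `break`: first failing corner stops the scan
def pvCornersOk (R2 Ru2 x y : Int) : List (Int × Int) → Bool
  | [] => true
  | (dx, dy) :: rest =>
    let tx := x + dx
    let ty := y + dy
    let d2 := tx * tx + ty * ty
    if d2 > R2 || d2 ≤ Ru2 || ((tx, ty) == ((0 : Int), (0 : Int))) then false
    else pvCornersOk R2 Ru2 x y rest

def find_anchors_annulus (R : Int) (Ru : Int) : List (Int × Int) :=
  let R2 := R * R
  let Ru2 := Ru * Ru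
  (PySem.List.pyRange (-R - 1) (R + 2) 1).foldl (fun anchors x =>
    (PySem.List.pyRange (-R - 1) (R + 2) 1).foldl (fun anchors y =>
      if pvCornersOk R2 Ru2 x y [(0, 0), (1, 0), (0, 1), (1, 1)] then anchors ++ [(x, y)]
      else anchors) anchors) []

-- ===== PORT B =====
def pvValidTile (R2 Ru2 tx ty : Int) : Bool :=
  Ru2 < tx * tx + ty * ty && tx * tx + ty * ty ≤ R2 && !((tx, ty) == ((0 : Int), (0 : Int)))

def pvBuildValid (R2 Ru2 : Int) (rng : List Int) (s : PySem.Set (Int × Int)) : PySem.Set (Int × Int) :=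
  rng.foldl (fun s tx =>
    rng.foldl (fun s ty =>
      if pvValidTile R2 Ru2 tx ty then PySem.Set.add s (tx, ty) else s) s) s

def find_anchors_annulus_alt (R : Int) (Ru : Int) : List (Int × Int) :=
  let R2 := R * R
  let Ru2 := Ru * Ru
  let valid := pvBuildValid R2 Ru2 (PySem.List.pyRange (-R - 1) (R + 3) 1) []
  (PySem.List.pyRange (-R - 1) (R + 2) 1).foldl (fun anchors x =>
    (PySem.List.pyRange (-R - 1) (R + 2) 1).foldl (fun anchors y =>
      if PySem.Set.contains valid (x, y) && PySem.Set.contains valid (x + 1, y) &&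
         PySem.Set.contains valid (x, y + 1) && PySem.Set.contains valid (x + 1, y + 1)
      then anchors ++ [(x, y)] else anchors) anchors) []

-- ===== PRECONDITION & SPEC =====
def Spec_find_anchors_annulus (R : Int) (Ru : Int) (out : List (Int × Int)) : Prop :=
  out = find_anchors_annulus_alt R Ru
instance (R : Int) (Ru : Int) (out : List (Int × Int)) : Decidable (Spec_find_anchors_annulus R Ru out) := by
  unfold Spec_find_anchors_annulus; infer_instance

-- ===== CLAIM =====
def Claim_equal_find_anchors_annulus : Prop :=
  ∀ (R : Int) (Ru : Int), Dom_find_anchors_annulus R Ru →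
    Spec_find_anchors_annulus R Ru (find_anchors_annulus R Ru)

-- ===== LEMMAS AND PROOFS =====
lemma mem_innerFold (R2 Ru2 tx : Int) (l : List Int) (s : PySem.Set (Int × Int)) (t : Int × Int) :
    t ∈ l.foldl (fun s ty => if pvValidTile R2 Ru2 tx ty then PySem.Set.add s (tx, ty) else s) s
      ↔ t ∈ s ∨ (t.1 = tx ∧ t.2 ∈ l ∧ pvValidTile R2 Ru2 t.1 t.2) := by
  rw [PySem.List.foldl_if_eq_foldl_filter,
      PySem.Set.mem_foldl_add (f := fun ty => (tx, ty))]
  simp only [List.mem_filter]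
  constructor
  · rintro (h | ⟨b, ⟨hb, hv⟩, rfl⟩)
    · exact Or.inl h
    · exact Or.inr ⟨rfl, hb, hv⟩
  · rintro (h | ⟨h1, h2, h3⟩)
    · exact Or.inl h
    · exact Or.inr ⟨t.2, ⟨h2, by rw [h1] at h3; exact h3⟩, by rw [← h1]⟩

lemma mem_outerFold (R2 Ru2 : Int) (L rng : List Int) (s : PySem.Set (Int × Int)) (t : Int × Int) :
    t ∈ L.foldl (fun s tx =>
        rng.foldl (fun s ty => if pvValidTile R2 Ru2 tx ty then PySem.Set.add s (tx, ty) else s) s) s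
      ↔ t ∈ s ∨ (t.1 ∈ L ∧ t.2 ∈ rng ∧ pvValidTile R2 Ru2 t.1 t.2) := by
  induction L generalizing s with
  | nil => simp
  | cons a L ih =>
    simp only [List.foldl_cons, ih, mem_innerFold, List.mem_cons]
    constructor
    · rintro ((h | ⟨h1, h2, h3⟩) | ⟨h1, h2, h3⟩)
      · exact Or.inl h
      · exact Or.inr ⟨Or.inl h1, h2, h3⟩
      · exact Or.inr ⟨Or.inr h1, h2, h3⟩
    · rintro (h | ⟨h1 | h1, h2, h3⟩)
      · exact Or.inl (Or.inl h)
      · exact Or.inl (Or.inr ⟨h1, h2, h3⟩)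
      · exact Or.inr ⟨h1, h2, h3⟩

lemma mem_pvBuildValid (R2 Ru2 : Int) (rng : List Int) (s : PySem.Set (Int × Int)) (t : Int × Int) :
    t ∈ pvBuildValid R2 Ru2 rng s ↔ t ∈ s ∨ (t.1 ∈ rng ∧ t.2 ∈ rng ∧ pvValidTile R2 Ru2 t.1 t.2) := by
  exact mem_outerFold R2 Ru2 rng rng s t

lemma contains_pvBuildValid (R Ru : Int) (tx ty : Int)
    (h1 : -R - 1 ≤ tx) (h2 : tx < R + 3) (h3 : -R - 1 ≤ ty) (h4 : ty < R + 3) :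
    PySem.Set.contains (pvBuildValid (R * R) (Ru * Ru) (PySem.List.pyRange (-R - 1) (R + 3) 1) []) (tx, ty)
      = pvValidTile (R * R) (Ru * Ru) tx ty := by
  rw [Bool.eq_iff_iff, PySem.Set.contains_iff, mem_pvBuildValid]
  simp only [List.not_mem_nil, false_or, PySem.List.mem_pyRange_one]
  constructor
  · rintro ⟨_, _, h⟩; exact h
  · intro h; exact ⟨⟨h1, h2⟩, ⟨h3, h4⟩, h⟩

lemma cornersOk_eq (R Ru x y : Int)
    (hx1 : -R - 1 ≤ x) (hx2 : x < R + 2) (hy1 : -R - 1 ≤ y) (hy2 : y < R + 2) :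
    pvCornersOk (R * R) (Ru * Ru) x y [(0, 0), (1, 0), (0, 1), (1, 1)]
      = (PySem.Set.contains (pvBuildValid (R * R) (Ru * Ru) (PySem.List.pyRange (-R - 1) (R + 3) 1) []) (x, y) &&
         PySem.Set.contains (pvBuildValid (R * R) (Ru * Ru) (PySem.List.pyRange (-R - 1) (R + 3) 1) []) (x + 1, y) &&
         PySem.Set.contains (pvBuildValid (R * R) (Ru * Ru) (PySem.List.pyRange (-R - 1) (R + 3) 1) []) (x, y + 1) &&
         PySem.Set.contains (pvBuildValid (R * R) (Ru * Ru) (PySem.List.pyRange (-R - 1) (R + 3) 1) []) (x + 1, y + 1)) := by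
  rw [contains_pvBuildValid R Ru x y (by omega) (by omega) (by omega) (by omega),
      contains_pvBuildValid R Ru (x + 1) y (by omega) (by omega) (by omega) (by omega),
      contains_pvBuildValid R Ru x (y + 1) (by omega) (by omega) (by omega) (by omega),
      contains_pvBuildValid R Ru (x + 1) (y + 1) (by omega) (by omega) (by omega) (by omega)]
  rw [Bool.eq_iff_iff]
  show pvCornersOk _ _ _ _ _ = true ↔ _
  simp only [pvCornersOk, pvValidTile, add_zero]
  generalize x * x = a
  generalize (x + 1) * (x + 1) = b
  generalize y * y = c
  generalize (y + 1) * (y + 1) = d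
  generalize R * R = r2
  generalize Ru * Ru = ru2
  constructor
  · intro h
    split_ifs at h <;> simp_all
  · intro h
    split_ifs
    all_goals simp_all
    all_goals omega

-- ===== VERDICT =====
theorem find_anchors_annulus_spec : Claim_equal_find_anchors_annulus := by
  intro R Ru _
  unfold Spec_find_anchors_annulus find_anchors_annulus find_anchors_annulus_alt
  apply PySem.List.foldl_congr_mem'
  intro x hx acc
  apply PySem.List.foldl_congr_mem'
  intro y hy acc
  rw [PySem.List.mem_pyRange_one] at hx hy
  rw [cornersOk_eq R Ru x y hx.1 hx.2 hy.1 hy.2]
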